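-- pv_equiv track=rewrite | github.com/tothedarktowercame/futon6 | scripts/verify-p6-gpl-h-direction-c.py | barbell_graph
-- ===== SOURCE A (Python) =====
-- def barbell_graph(k):
--     edges = []
--     for i in range(k):
--         for j in range(i + 1, k):
--             edges.append((i, j))
--     for i in range(k, 2 * k):
--         for j in range(i + 1, 2 * k):
--             edges.append((i, j))
--     edges.append((k - 1, k))
--     return 2 * k, edges
-- ===== SOURCE B (Python) =====
-- def barbell_graph(k):
--     n = 2 * k
--     edges = [(i, j) for i in range(n) for j in range(i + 1, n) if j < k or k <= i]
--     edges.append((k - 1, k))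
--     return n, edges
-- ===== Notes on version B (the rewrite author's own statement) =====
-- stated objective: alternative
-- what changed: B is generate-and-filter: one comprehension enumerates every candidate pair (i,j) of the whole 2k-vertex set and keeps a pair iff both endpoints lie on the same side of the bridge (j < k or k <= i), instead of A's two separately staged clique enumerations over disjoint index ranges.
import Mathlib
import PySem

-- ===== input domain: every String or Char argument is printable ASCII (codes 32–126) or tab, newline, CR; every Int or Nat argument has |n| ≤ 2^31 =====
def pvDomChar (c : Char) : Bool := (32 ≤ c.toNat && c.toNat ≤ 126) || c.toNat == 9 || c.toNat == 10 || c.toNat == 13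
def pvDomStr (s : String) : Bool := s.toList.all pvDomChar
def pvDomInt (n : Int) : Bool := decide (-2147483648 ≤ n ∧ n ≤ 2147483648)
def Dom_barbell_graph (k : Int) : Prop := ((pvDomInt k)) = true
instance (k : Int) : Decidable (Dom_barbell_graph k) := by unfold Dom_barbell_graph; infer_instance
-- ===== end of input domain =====

-- B generates every candidate pair of the whole 2k-vertex set and filters by the
-- same-side predicate (j < k or k <= i), instead of A's two staged clique loops; same cost.

-- ===== PORT A =====
def barbell_graph (k : Int) : Int × (List (Int × Int)) :=
  let edges : List (Int × Int) := []
  let edges := (PySem.List.pyRange 0 k 1).foldl (fun acc i =>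
    (PySem.List.pyRange (i + 1) k 1).foldl (fun acc2 j => acc2 ++ [(i, j)]) acc) edges
  let edges := (PySem.List.pyRange k (2 * k) 1).foldl (fun acc i =>
    (PySem.List.pyRange (i + 1) (2 * k) 1).foldl (fun acc2 j => acc2 ++ [(i, j)]) acc) edges
  (2 * k, edges ++ [(k - 1, k)])

-- ===== PORT B =====
def barbell_graph_alt (k : Int) : Int × (List (Int × Int)) :=
  let n := 2 * k
  let edges : List (Int × Int) := (PySem.List.pyRange 0 n 1).flatMap (fun i =>
    ((PySem.List.pyRange (i + 1) n 1).filter (fun j => j < k || k ≤ i)).map (fun j => (i, j)))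
  (n, edges ++ [(k - 1, k)])

-- ===== PRECONDITION & SPEC =====
def Spec_barbell_graph (k : Int) (out : Int × (List (Int × Int))) : Prop := out = barbell_graph_alt k
instance (k : Int) (out : Int × (List (Int × Int))) : Decidable (Spec_barbell_graph k out) := by unfold Spec_barbell_graph; infer_instance

-- ===== CLAIM (what is proved, stated in full; the proofs are below) =====
def Claim_equal_barbell_graph : Prop := ∀ (k : Int), Dom_barbell_graph k → Spec_barbell_graph k (barbell_graph k)

-- ===== LEMMAS AND PROOFS =====

-- a nested append-in-loop loop is a flatMap of maps
lemma nested_loop_eq (lo hi : Int) (acc : List (Int × Int)) :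
    (PySem.List.pyRange lo hi 1).foldl (fun acc i =>
      (PySem.List.pyRange (i + 1) hi 1).foldl (fun acc2 j => acc2 ++ [(i, j)]) acc) acc
    = acc ++ (PySem.List.pyRange lo hi 1).flatMap (fun i =>
        (PySem.List.pyRange (i + 1) hi 1).map (fun j => (i, j))) := by
  calc (PySem.List.pyRange lo hi 1).foldl (fun acc i =>
          (PySem.List.pyRange (i + 1) hi 1).foldl (fun acc2 j => acc2 ++ [(i, j)]) acc) acc
      = (PySem.List.pyRange lo hi 1).foldl (fun acc i =>
          acc ++ (PySem.List.pyRange (i + 1) hi 1).map (fun j => (i, j))) acc := by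
        refine PySem.List.foldl_congr_mem _ _ _ _ ?_
        intro a x _
        exact PySem.List.foldl_append_singleton_eq_map _ _ _
    _ = _ := PySem.List.foldl_append_eq_flatMap _ _ _

-- the filtered generate-over-all-pairs list splits into the two cliques
lemma filtered_split (k : Int) :
    (PySem.List.pyRange 0 (2 * k) 1).flatMap (fun i =>
      ((PySem.List.pyRange (i + 1) (2 * k) 1).filter (fun j => j < k || k ≤ i)).map (fun j => (i, j)))
    = (PySem.List.pyRange 0 k 1).flatMap (fun i =>
        (PySem.List.pyRange (i + 1) k 1).map (fun j => (i, j)))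
      ++ (PySem.List.pyRange k (2 * k) 1).flatMap (fun i =>
        (PySem.List.pyRange (i + 1) (2 * k) 1).map (fun j => (i, j))) := by
  by_cases hk : k ≤ 0
  · have e1 : PySem.List.pyRange 0 (2 * k) 1 = [] := PySem.List.pyRange_one_eq_nil (by omega)
    have e2 : PySem.List.pyRange 0 k 1 = [] := PySem.List.pyRange_one_eq_nil (by omega)
    have e3 : PySem.List.pyRange k (2 * k) 1 = [] := PySem.List.pyRange_one_eq_nil (by omega)
    rw [e1, e2, e3]
    simp
  · rw [PySem.List.pyRange_one_append 0 k (2 * k) (by omega) (by omega), List.flatMap_append]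
    congr 1
    · refine List.flatMap_congr ?_
      intro i hi
      rw [PySem.List.mem_pyRange_one] at hi
      have hfilter : (PySem.List.pyRange (i + 1) (2 * k) 1).filter (fun j => j < k || k ≤ i)
          = PySem.List.pyRange (i + 1) k 1 := by
        rw [PySem.List.pyRange_one_append (i + 1) k (2 * k) (by omega) (by omega),
            List.filter_append]
        have h1 : (PySem.List.pyRange (i + 1) k 1).filter (fun j => j < k || k ≤ i)
            = PySem.List.pyRange (i + 1) k 1 := by
          refine List.filter_eq_self.mpr ?_
          intro j hj
          rw [PySem.List.mem_pyRange_one] at hj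
          simp only [Bool.or_eq_true, decide_eq_true_eq]
          left; omega
        have h2 : (PySem.List.pyRange k (2 * k) 1).filter (fun j => j < k || k ≤ i)
            = [] := by
          refine List.filter_eq_nil_iff.mpr ?_
          intro j hj
          rw [PySem.List.mem_pyRange_one] at hj
          simp only [Bool.or_eq_true, decide_eq_true_eq, not_or]
          constructor <;> omega
        rw [h1, h2, List.append_nil]
      rw [hfilter]
    · refine List.flatMap_congr ?_
      intro i hi
      rw [PySem.List.mem_pyRange_one] at hi
      have hfilter : (PySem.List.pyRange (i + 1) (2 * k) 1).filter (fun j => j < k || k ≤ i)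
          = PySem.List.pyRange (i + 1) (2 * k) 1 := by
        refine List.filter_eq_self.mpr ?_
        intro j _
        simp only [Bool.or_eq_true, decide_eq_true_eq]
        right; omega
      rw [hfilter]

-- ===== VERDICT (by name: the statement is the Claim_ definition above) =====
theorem barbell_graph_spec : Claim_equal_barbell_graph := by
  intro k _
  unfold Spec_barbell_graph barbell_graph barbell_graph_alt
  simp only [nested_loop_eq, List.nil_append, filtered_split, List.append_assoc]
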